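-- pv_equiv track=rewrite | github.com/kellymhli/code-challenges | longest-happy-prefix.py | longestHappyPrefix
-- ===== SOURCE A (Python) =====
-- def longestHappyPrefix(s):
--     res = ""
--     i = len(s) - 1
--     while i > 0:
--         if s[:i] == s[-i:]:
--             res = s[:i]
--             break
--         i -= 1
--     return res
-- ===== SOURCE B (Python) =====
-- def longestHappyPrefix(s):
--     n = len(s)
--     if n == 0:
--         return ""
--     pi = [0]
--     k = 0
--     for i in range(1, n):
--         while k and s[i] != s[k]:
--             k = pi[k - 1]
--         if s[i] == s[k]:
--             k += 1
--         pi.append(k)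
--     return s[:k]
-- ===== Notes on version B (the rewrite author's own statement) =====
-- stated objective: faster
-- what changed: Replaced the descending brute-force scan that compares prefix s[:i] with suffix s[-i:] for each i by the KMP failure-function computed in one left-to-right pass; the answer is the prefix of length of the last failure value.
import Mathlib
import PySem

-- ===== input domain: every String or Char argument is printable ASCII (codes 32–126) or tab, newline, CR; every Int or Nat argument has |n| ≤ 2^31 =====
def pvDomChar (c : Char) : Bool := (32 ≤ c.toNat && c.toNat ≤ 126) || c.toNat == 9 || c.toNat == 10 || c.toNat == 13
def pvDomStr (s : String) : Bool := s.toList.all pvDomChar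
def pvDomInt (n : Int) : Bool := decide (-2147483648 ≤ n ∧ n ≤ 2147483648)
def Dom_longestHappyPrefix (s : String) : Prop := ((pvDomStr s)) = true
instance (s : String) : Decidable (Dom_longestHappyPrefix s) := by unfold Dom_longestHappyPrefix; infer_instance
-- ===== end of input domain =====

-- B replaces A's descending quadratic prefix/suffix scan by the linear KMP failure-function pass
-- (objective: faster, asymptotic O(n^2) -> O(n)); proved to return the same string on every input.


-- ===== PORT A =====
-- A's while loop: i runs from len(s)-1 down to 1, returning s[:i] at the first i with s[:i] == s[-i:].
def pvGoA (l : List Char) : Nat → List Char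
  | 0 => []
  | i + 1 =>
    if PySem.List.slice l none (some ((i + 1 : Nat) : Int)) =
       PySem.List.slice l (some (-((i + 1 : Nat) : Int))) none
    then PySem.List.slice l none (some ((i + 1 : Nat) : Int))
    else pvGoA l i

def longestHappyPrefix (s : String) : String :=
  String.ofList (pvGoA s.toList (s.toList.length - 1))

-- ===== PORT B =====
-- B's inner `while k and s[i] != s[k]: k = pi[k-1]`; fuel = the entry value of k (each step
-- strictly decreases k because pi[k-1] < k for the real failure table, so this fuel suffices).
def pvFall (l : List Char) (pi : List Nat) (c : Char) : Nat → Nat → Nat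
  | 0, k => k
  | fuel + 1, k =>
    if k ≠ 0 ∧ c ≠ PySem.List.pyGetD l (k : Int) ' ' then
      pvFall l pi c fuel (PySem.List.pyGetD pi ((k : Int) - 1) 0)
    else k

-- one iteration of B's `for i in range(1, n)` body, state = (pi, k)
def pvStep (l : List Char) (st : List Nat × Nat) (i : Int) : List Nat × Nat :=
  let c := PySem.List.pyGetD l i ' '
  let k0 := pvFall l st.1 c st.2 st.2
  let k1 := if c = PySem.List.pyGetD l (k0 : Int) ' ' then k0 + 1 else k0
  (st.1 ++ [k1], k1)

def longestHappyPrefix_alt (s : String) : String :=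
  let l := s.toList
  let n := l.length
  if n = 0 then "" else
    let st := (PySem.List.pyRange 1 (n : Int)).foldl (pvStep l) ([0], 0)
    String.ofList (PySem.List.slice l none (some (st.2 : Int)))

-- ===== PRECONDITION & SPEC =====
def Spec_longestHappyPrefix (s : String) (out : String) : Prop := out = longestHappyPrefix_alt s
instance (s : String) (out : String) : Decidable (Spec_longestHappyPrefix s out) := by unfold Spec_longestHappyPrefix; infer_instance

-- ===== CLAIM (what is proved, stated in full; the proofs are below) =====
def Claim_equal_longestHappyPrefix : Prop := ∀ (s : String), Dom_longestHappyPrefix s → Spec_longestHappyPrefix s (longestHappyPrefix s)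

-- ===== LEMMAS AND PROOFS =====

-- max proper border of l.take i ("pi[i-1]" of KMP): greatest k < i with l.take k a suffix of l.take i
def pvMxp (l : List Char) (i : Nat) : Nat :=
  Nat.findGreatest (fun k => k < i ∧ l.take k <:+ l.take i) i

theorem pv_concat_suffix_iff (a b : List Char) (x y : Char) :
    a ++ [x] <:+ b ++ [y] ↔ (a <:+ b ∧ x = y) := by
  constructor
  · intro h
    rw [← List.reverse_prefix] at h
    simp only [List.reverse_append, List.reverse_cons, List.reverse_nil, List.nil_append,
      List.singleton_append] at h
    rcases List.cons_prefix_cons.mp h with ⟨hxy, htl⟩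
    exact ⟨List.reverse_prefix.mp htl, hxy⟩
  · rintro ⟨⟨t, rfl⟩, rfl⟩
    exact ⟨t, by simp⟩

theorem pv_take_concat (l : List Char) (i : Nat) (h : i < l.length) :
    l.take (i + 1) = l.take i ++ [l.getD i ' '] := by
  rw [List.take_add_one, List.getElem?_eq_getElem h]
  simp [List.getD, List.getElem?_eq_getElem h]

-- border extension: a (k+1)-border of take (i+1) is a k-border of take i whose next char matches
theorem pv_ext (l : List Char) (k i : Nat) (hk : k ≤ i) (hi : i < l.length) :
    (l.take (k + 1) <:+ l.take (i + 1)) ↔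
      (l.take k <:+ l.take i ∧ l.getD k ' ' = l.getD i ' ') := by
  rw [pv_take_concat l i hi, pv_take_concat l k (lt_of_le_of_lt hk hi), pv_concat_suffix_iff]

-- nesting: among suffix-prefixes of the same prefix, the shorter is a suffix of the longer
theorem pv_nest (l : List Char) (i j k : Nat) (hjk : j ≤ k)
    (hj : l.take j <:+ l.take i) (hk : l.take k <:+ l.take i) :
    l.take j <:+ l.take k := by
  refine List.suffix_of_suffix_length_le hj hk ?_
  simp only [List.length_take]
  omega

theorem pv_mxp_prop (l : List Char) (i : Nat) :
    pvMxp l i ≤ i ∧ (pvMxp l i ≠ 0 → pvMxp l i < i ∧ l.take (pvMxp l i) <:+ l.take i) := by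
  unfold pvMxp
  have h := (Nat.findGreatest_eq_iff
    (P := fun k => k < i ∧ l.take k <:+ l.take i) (k := i)).mp rfl
  exact ⟨h.1, fun hne => h.2.1 hne⟩

theorem pv_mxp_lt (l : List Char) (i : Nat) (hi : 1 ≤ i) : pvMxp l i < i := by
  rcases Nat.eq_zero_or_pos (pvMxp l i) with h | h
  · omega
  · exact ((pv_mxp_prop l i).2 (Nat.pos_iff_ne_zero.mp h)).1

theorem pv_mxp_bord (l : List Char) (i : Nat) : l.take (pvMxp l i) <:+ l.take i := by
  rcases Nat.eq_zero_or_pos (pvMxp l i) with h | h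
  · rw [h]; exact List.nil_suffix
  · exact ((pv_mxp_prop l i).2 (Nat.pos_iff_ne_zero.mp h)).2

theorem pv_mxp_max (l : List Char) (i k : Nat) (h1 : k < i) (h2 : l.take k <:+ l.take i) :
    k ≤ pvMxp l i :=
  Nat.le_findGreatest (le_of_lt h1) ⟨h1, h2⟩

theorem pv_mxp_one (l : List Char) : pvMxp l 1 = 0 := by
  unfold pvMxp
  rw [Nat.findGreatest_succ]
  simp

-- correctness of the fallback loop: it finds the longest matching border not longer than k
theorem pv_fall_spec (l : List Char) (pi : List Nat) (c : Char) (i : Nat) (hi : i < l.length)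
    (hpi : ∀ j, j < i → pi.getD j 0 = pvMxp l (j + 1)) :
    ∀ fuel k, k ≤ fuel → k < i → l.take k <:+ l.take i →
      (pvFall l pi c fuel k ≤ k ∧ pvFall l pi c fuel k < i ∧
       l.take (pvFall l pi c fuel k) <:+ l.take i ∧
       (pvFall l pi c fuel k = 0 ∨ c = l.getD (pvFall l pi c fuel k) ' ') ∧
       (∀ j, j ≤ k → l.take j <:+ l.take i → c = l.getD j ' ' → j ≤ pvFall l pi c fuel k)) := by
  intro fuel
  induction fuel with
  | zero =>
    intro k hk hki hkb
    have hk0 : k = 0 := Nat.le_zero.mp hk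
    subst hk0
    exact ⟨le_rfl, hki, hkb, Or.inl rfl, fun j hj _ _ => hj⟩
  | succ fuel ih =>
    intro k hk hki hkb
    have hcast : ∀ (j : Nat), PySem.List.pyGetD l (j : Int) ' ' = l.getD j ' ' :=
      fun j => PySem.List.pyGetD_natCast l j ' '
    by_cases hcond : k ≠ 0 ∧ c ≠ PySem.List.pyGetD l (k : Int) ' '
    · have hk0 : k ≠ 0 := hcond.1
      have hgetD : PySem.List.pyGetD pi ((k : Int) - 1) 0 = pvMxp l k := by
        have hc1 : ((k : Int) - 1) = ((k - 1 : Nat) : Int) := by omega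
        rw [hc1, PySem.List.pyGetD_natCast]
        have := hpi (k - 1) (by omega)
        rwa [Nat.sub_add_cancel (by omega : 1 ≤ k)] at this
      have hrw : pvFall l pi c (fuel + 1) k = pvFall l pi c fuel (pvMxp l k) := by
        simp only [pvFall, if_pos hcond, hgetD]
      have hmlt : pvMxp l k < k := pv_mxp_lt l k (by omega)
      have hmb : l.take (pvMxp l k) <:+ l.take i := (pv_mxp_bord l k).trans hkb
      have IH := ih (pvMxp l k) (by omega) (by omega) hmb
      rw [hrw]
      refine ⟨IH.1.trans (by omega), IH.2.1, IH.2.2.1, IH.2.2.2.1, ?_⟩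
      intro j hj hjb hjc
      rcases Nat.lt_or_ge j k with hjk | hjk
      · have hjk' : l.take j <:+ l.take k := pv_nest l i j k (le_of_lt hjk) hjb hkb
        exact IH.2.2.2.2 j (pv_mxp_max l k j hjk hjk') hjb hjc
      · have hjeq : j = k := le_antisymm hj hjk
        subst hjeq
        rw [hcast j] at hcond
        exact absurd hjc hcond.2
    · have hrw : pvFall l pi c (fuel + 1) k = k := by
        simp only [pvFall, if_neg hcond]
      rw [hrw]
      refine ⟨le_rfl, hki, hkb, ?_, fun j hj _ _ => hj⟩
      by_cases hk0 : k = 0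
      · exact Or.inl hk0
      · have : c = PySem.List.pyGetD l (k : Int) ' ' := by
          by_contra hne
          exact hcond ⟨hk0, hne⟩
        rw [hcast k] at this
        exact Or.inr this

-- one loop iteration maintains the invariant
theorem pv_step_correct (l : List Char) (pi : List Nat) (i : Nat) (h1 : 1 ≤ i)
    (hi : i < l.length) (hpi : ∀ j, j < i → pi.getD j 0 = pvMxp l (j + 1)) :
    pvStep l (pi, pvMxp l i) (i : Int) = (pi ++ [pvMxp l (i + 1)], pvMxp l (i + 1)) := by
  have hcast : ∀ (j : Nat), PySem.List.pyGetD l (j : Int) ' ' = l.getD j ' ' :=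
    fun j => PySem.List.pyGetD_natCast l j ' '
  have hklt : pvMxp l i < i := pv_mxp_lt l i h1
  have hkb : l.take (pvMxp l i) <:+ l.take i := pv_mxp_bord l i
  have F := pv_fall_spec l pi (PySem.List.pyGetD l (i : Int) ' ') i hi hpi
    (pvMxp l i) (pvMxp l i) le_rfl hklt hkb
  set r := pvFall l pi (PySem.List.pyGetD l (i : Int) ' ') (pvMxp l i) (pvMxp l i) with hr
  obtain ⟨hrk, hri, hrb, hrex, hrmax⟩ := F
  have hmxp1 : ∀ m, m ≠ 0 → m < i + 1 → l.take m <:+ l.take (i + 1) →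
      (l.take (m - 1) <:+ l.take i ∧ l.getD (m - 1) ' ' = l.getD i ' ' ∧ m - 1 ≤ pvMxp l i) := by
    intro m hm0 hmlt hmb
    have hm1 : m - 1 + 1 = m := by omega
    rw [← hm1] at hmb
    have hext := (pv_ext l (m - 1) i (by omega) hi).mp hmb
    exact ⟨hext.1, hext.2, pv_mxp_max l i (m - 1) (by omega) hext.1⟩
  by_cases hc : PySem.List.pyGetD l (i : Int) ' ' = PySem.List.pyGetD l (r : Int) ' '
  · -- matched: the new k is r + 1 = mxp (i+1)
    have hchar : l.getD r ' ' = l.getD i ' ' := by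
      rw [← hcast r, ← hcast i]; exact hc.symm
    have hnew : r + 1 = pvMxp l (i + 1) := by
      apply le_antisymm
      · exact pv_mxp_max l (i + 1) (r + 1) (by omega)
          ((pv_ext l r i (by omega) hi).mpr ⟨hrb, hchar⟩)
      · rcases Nat.eq_zero_or_pos (pvMxp l (i + 1)) with h0 | h0
        · omega
        · obtain ⟨hmlt', hmb'⟩ := (pv_mxp_prop l (i + 1)).2 (Nat.pos_iff_ne_zero.mp h0)
          obtain ⟨hb', hch', hle'⟩ := hmxp1 (pvMxp l (i + 1))
            (Nat.pos_iff_ne_zero.mp h0) hmlt' hmb'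
          have := hrmax (pvMxp l (i + 1) - 1) hle' hb' (by rw [hcast i, hch'])
          omega
    simp only [pvStep, ← hr, if_pos hc, hnew]
  · -- no match: r = 0 and mxp (i+1) = 0
    have hr0 : r = 0 := by
      rcases hrex with h | h
      · exact h
      · exfalso; rw [← hcast r] at h; exact hc h
    have hnew : pvMxp l (i + 1) = 0 := by
      unfold pvMxp
      rw [Nat.findGreatest_eq_zero_iff]
      intro m hm hmle hP
      obtain ⟨hb', hch', hle'⟩ := hmxp1 m (by omega) hP.1 hP.2
      have hmr := hrmax (m - 1) hle' hb' (by rw [hcast i]; exact hch'.symm)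
      have hm1 : m = 1 := by omega
      apply hc
      rw [hcast i, hcast r, hr0]
      rw [hm1] at hch'
      simpa using hch'.symm
    simp only [pvStep, ← hr, if_neg hc, hnew]
    rw [hr0]

-- the folded loop computes pi = [mxp 1, …, mxp i] and k = mxp i
theorem pv_fold_inv (l : List Char) :
    ∀ i, 1 ≤ i → i ≤ l.length →
      (PySem.List.pyRange 1 (i : Int)).foldl (pvStep l) ([0], 0) =
        ((List.range i).map (fun j => pvMxp l (j + 1)), pvMxp l i) := by
  intro i
  induction i with
  | zero => omega
  | succ i ih =>
    intro _ hle
    rcases Nat.eq_zero_or_pos i with h0 | h0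
    · subst h0
      have hrange : PySem.List.pyRange 1 ((1 : Nat) : Int) = [] := by decide
      rw [hrange]
      simp [pv_mxp_one l]
    · have hi : i < l.length := by omega
      have hpush : ((i + 1 : Nat) : Int) = ((i : Nat) : Int) + 1 := by push_cast; ring
      rw [hpush, PySem.List.pyRange_one_succ_right (by exact_mod_cast h0),
        List.foldl_append, ih h0 (by omega)]
      simp only [List.foldl_cons, List.foldl_nil]
      have hpi : ∀ j, j < i →
          ((List.range i).map (fun j => pvMxp l (j + 1))).getD j 0 = pvMxp l (j + 1) := by
        intro j hj
        rw [List.getD_eq_getElem _ 0 (by simpa using hj)]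
        simp
      rw [pv_step_correct l _ i h0 hi hpi]
      rw [List.range_succ, List.map_append]
      rfl

-- A's slice comparison is the suffix test
theorem pv_slice_suffix (l : List Char) (k : Nat) (h1 : 1 ≤ k) (h2 : k ≤ l.length) :
    (PySem.List.slice l none (some (k : Int)) = PySem.List.slice l (some (-(k : Int))) none) ↔
      l.take k <:+ l := by
  rw [PySem.List.slice_to_natCast, PySem.List.slice_from_neg_natCast l k h1]
  constructor
  · intro h; rw [h]; exact List.drop_suffix _ _
  · intro h
    have := List.suffix_iff_eq_drop.mp h
    rwa [List.length_take, Nat.min_eq_left h2] at this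

-- A's descending loop returns the longest suffix-prefix of length ≤ m
theorem pv_goA_eq (l : List Char) :
    ∀ m, m < l.length →
      pvGoA l m = l.take (Nat.findGreatest (fun k => l.take k <:+ l) m) := by
  intro m
  induction m with
  | zero => intro _; rfl
  | succ m ih =>
    intro hlt
    have hiff := pv_slice_suffix l (m + 1) (by omega) (by omega)
    rw [Nat.findGreatest_succ]
    by_cases h : l.take (m + 1) <:+ l
    · simp only [pvGoA, if_pos (hiff.mpr h), if_pos h]
      rw [PySem.List.slice_to_natCast]
    · simp only [pvGoA, if_neg (fun hc => h (hiff.mp hc)), if_neg h]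
      exact ih (by omega)

theorem pv_fg_congr (P Q : Nat → Prop) [DecidablePred P] [DecidablePred Q] :
    ∀ b, (∀ k, k ≤ b → (P k ↔ Q k)) → Nat.findGreatest P b = Nat.findGreatest Q b := by
  intro b
  induction b with
  | zero => intro _; rfl
  | succ n ih =>
    intro h
    rw [Nat.findGreatest_succ, Nat.findGreatest_succ]
    by_cases hp : P (n + 1)
    · simp [hp, (h (n + 1) le_rfl).mp hp]
    · have hq : ¬ Q (n + 1) := fun hq => hp ((h (n + 1) le_rfl).mpr hq)
      simp only [hp, hq, if_false]
      exact ih (fun k hk => h k (Nat.le_succ_of_le hk))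

-- link: the two maximisations agree
theorem pv_link (l : List Char) (h : 1 ≤ l.length) :
    Nat.findGreatest (fun k => l.take k <:+ l) (l.length - 1) = pvMxp l l.length := by
  unfold pvMxp
  have hn : l.length = (l.length - 1) + 1 := by omega
  rw [hn, Nat.findGreatest_succ, if_neg (by omega ∘ And.left), ← hn]
  exact pv_fg_congr _ _ (l.length - 1) (fun k hk => by
    rw [List.take_length]
    constructor
    · intro hs; exact ⟨by omega, hs⟩
    · exact And.right)

-- ===== VERDICT (by name: the statement is the Claim_ definition above) =====
theorem longestHappyPrefix_spec : Claim_equal_longestHappyPrefix := by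
  intro s _
  unfold Spec_longestHappyPrefix longestHappyPrefix longestHappyPrefix_alt
  rcases Nat.eq_zero_or_pos s.toList.length with h0 | h0
  · have : s.toList = [] := List.eq_nil_of_length_eq_zero h0
    rw [this]
    rfl
  · rw [if_neg (by omega)]
    simp only
    rw [pv_fold_inv s.toList s.toList.length h0 le_rfl]
    simp only
    rw [PySem.List.slice_to_natCast]
    rw [pv_goA_eq s.toList (s.toList.length - 1) (by omega),
      pv_link s.toList h0]
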